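-- pv_equiv track=rewrite | github.com/jayantsom/TraumaGemma_Lifesaver | MedSAM3/src/lora/lora_utils.py | _should_inject_lora
-- ===== SOURCE A (Python) =====
-- from typing import Dict, List, Optional, Set
--
-- def _should_inject_lora(name: str, target_modules: Set[str]) -> bool:
--     """
--     Check if a module should have LoRA injected based on its name.
--
--     Args:
--         name: Module name
--         target_modules: Set of target module patterns
--
--     Returns:
--         True if LoRA should be injected
--     """
--     # Get the module basename (last part of the name)
--     module_basename = name.split(".")[-1]
--
--     # Direct basename match - most reliable method
--     if module_basename in target_modules:
--         return True
--
--     # Check for substring matches in basename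
--     # This handles cases like "out_proj" matching "proj" target
--     for target in target_modules:
--         if target in module_basename:
--             return True
--
--     # Check for substring matches in full name
--     # This handles patterns like "self_attn" appearing in the path
--     for target in target_modules:
--         if target in name:
--             # Make sure we're matching a meaningful component
--             # Avoid false positives by checking it's a component boundary
--             parts = name.split(".")
--             for part in parts:
--                 if target == part or target in part:
--                     return True
--
--     return False
-- ===== SOURCE B (Python) =====
-- def _should_inject_lora(name, target_modules):
--     # One unified scan: LoRA is injected iff some target pattern is a
--     # substring of some dot-separated component of the module name.
--     for part in name.split("."):
--         for target in target_modules: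
--             if target in part:
--                 return True
--     return False
-- ===== Notes on version B (the rewrite author's own statement) =====
-- stated objective: simpler
-- what changed: A's three stages (basename set membership, basename substring loop, full-name prefilter plus per-component rescan) collapse into a single nested scan: return True iff some target is a substring of some dot-separated component, which provably subsumes all three stages.
import Mathlib
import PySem

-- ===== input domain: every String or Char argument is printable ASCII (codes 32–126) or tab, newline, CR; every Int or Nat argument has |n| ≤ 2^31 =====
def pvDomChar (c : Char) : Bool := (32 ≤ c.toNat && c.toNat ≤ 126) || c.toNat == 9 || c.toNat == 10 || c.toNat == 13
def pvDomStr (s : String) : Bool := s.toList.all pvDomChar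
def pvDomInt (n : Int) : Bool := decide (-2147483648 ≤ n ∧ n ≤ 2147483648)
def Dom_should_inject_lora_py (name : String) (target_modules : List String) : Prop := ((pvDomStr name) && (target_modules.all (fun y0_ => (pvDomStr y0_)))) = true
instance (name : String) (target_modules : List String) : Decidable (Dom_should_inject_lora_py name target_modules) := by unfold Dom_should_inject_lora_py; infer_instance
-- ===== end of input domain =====

-- B collapses A's three matching stages into one nested scan over components x targets (simpler); return values proved equal.
-- ===== PORT A =====
def should_inject_lora_py (name : String) (target_modules : List String) : Bool :=
  -- module_basename = name.split(".")[-1]  (split with a nonempty separator never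
  -- returns an empty list, so the [-1] index never raises; getD "" is unreachable)
  let parts := (PySem.Str.split? name ".").getD []
  let module_basename := (PySem.List.pyGet? parts (-1)).getD ""
  -- if module_basename in target_modules: return True
  if target_modules.contains module_basename then true
  -- for target in target_modules: if target in module_basename: return True
  else if target_modules.any (fun target => PySem.Str.isIn target module_basename) then true
  -- for target in target_modules: if target in name: for part in name.split("."):
  --   if target == part or target in part: return True
  else target_modules.any (fun target =>
    PySem.Str.isIn target name &&
    ((PySem.Str.split? name ".").getD []).any (fun part =>
      target == part || PySem.Str.isIn target part))

-- ===== PORT B =====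
def should_inject_lora_py_alt (name : String) (target_modules : List String) : Bool :=
  ((PySem.Str.split? name ".").getD []).any (fun part =>
    target_modules.any (fun target => PySem.Str.isIn target part))

-- ===== PRECONDITION & SPEC =====
def Spec_should_inject_lora_py (name : String) (target_modules : List String) (out : Bool) : Prop := out = should_inject_lora_py_alt name target_modules
instance (name : String) (target_modules : List String) (out : Bool) : Decidable (Spec_should_inject_lora_py name target_modules out) := by unfold Spec_should_inject_lora_py; infer_instance

-- ===== CLAIM (what is proved, stated in full; the proofs are below) =====
def Claim_equal_should_inject_lora_py : Prop := ∀ (name : String) (target_modules : List String), Dom_should_inject_lora_py name target_modules → Spec_should_inject_lora_py name target_modules (should_inject_lora_py name target_modules)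

-- ===== LEMMAS AND PROOFS =====

-- every element produced by splitOn.go is either from acc or an infix of cur.reverse ++ l
theorem pv_go_mem (sep : List Char) (fuel : Nat) : ∀ (l cur : List Char) (acc : List (List Char)) (p : List Char),
    p ∈ PySem.Chars.splitOn.go sep fuel l cur acc → p ∈ acc ∨ p <:+: (cur.reverse ++ l) := by
  induction fuel with
  | zero =>
    intro l cur acc p hp
    rw [PySem.Chars.splitOn.go] at hp
    simp at hp
    rcases hp with h | h
    · exact Or.inl h
    · exact Or.inr (h ▸ List.infix_refl _)
  | succ n ih =>
    intro l cur acc p hp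
    cases l with
    | nil =>
      simp only [PySem.Chars.splitOn.go] at hp
      simp at hp
      rcases hp with h | h
      · exact Or.inl h
      · exact Or.inr (by simp [h])
    | cons c rest =>
      rw [PySem.Chars.splitOn.go] at hp
      by_cases hpre : sep.isPrefixOf (c :: rest) = true
      · rw [if_pos hpre] at hp
        rcases ih _ _ _ _ hp with h | h
        · rcases List.mem_cons.mp h with h | h
          · exact Or.inr (h ▸ (List.prefix_append cur.reverse (c :: rest)).isInfix)
          · exact Or.inl h
        · refine Or.inr ?_
          simp only [List.reverse_nil, List.nil_append] at h
          exact (h.trans (List.drop_suffix _ _).isInfix).trans (List.suffix_append cur.reverse (c :: rest)).isInfix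
      · rw [if_neg hpre] at hp
        rcases ih _ _ _ _ hp with h | h
        · exact Or.inl h
        · refine Or.inr ?_
          simpa using h

theorem pv_go_ne_nil (sep : List Char) (fuel : Nat) : ∀ (l cur : List Char) (acc : List (List Char)),
    PySem.Chars.splitOn.go sep fuel l cur acc ≠ [] := by
  induction fuel with
  | zero =>
    intro l cur acc
    rw [PySem.Chars.splitOn.go]; simp
  | succ n ih =>
    intro l cur acc
    cases l with
    | nil => simp only [PySem.Chars.splitOn.go]; simp
    | cons c rest =>
      rw [PySem.Chars.splitOn.go]
      by_cases hpre : sep.isPrefixOf (c :: rest) = true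
      · rw [if_pos hpre]; exact ih _ _ _
      · rw [if_neg hpre]; exact ih _ _ _

-- every piece of a split is an infix of the original string
theorem pv_splitOn_mem_infix {s sep p : List Char} (h : p ∈ PySem.Chars.splitOn s sep) : p <:+: s := by
  rw [PySem.Chars.splitOn] at h
  rcases pv_go_mem sep _ s [] [] p h with h | h
  · simp at h
  · simpa using h

theorem pv_splitOn_ne_nil (s sep : List Char) : PySem.Chars.splitOn s sep ≠ [] := by
  rw [PySem.Chars.splitOn]; exact pv_go_ne_nil _ _ _ _ _

theorem pv_pyGet?_mem {α : Type} {xs : List α} {i : Int} {x : α} (h : PySem.List.pyGet? xs i = some x) : x ∈ xs := by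
  simp only [PySem.List.pyGet?, PySem.List.pyIdx?, Option.bind_eq_some_iff] at h
  obtain ⟨k, _, hk⟩ := h
  exact List.mem_of_getElem? hk

theorem pv_parts_eq (name : String) :
    (PySem.Str.split? name ".").getD [] = (PySem.Chars.splitOn name.toList ['.']).map String.ofList := by
  simp [PySem.Str.split?, PySem.Chars.split?]

theorem pv_alt_true_iff (name : String) (tm : List String) :
    should_inject_lora_py_alt name tm = true ↔
      ∃ p ∈ PySem.Chars.splitOn name.toList ['.'], ∃ t ∈ tm, t.toList <:+: p := by
  simp [should_inject_lora_py_alt, pv_parts_eq, PySem.Chars.isIn_iff_infix]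

theorem pv_main (name : String) (tm : List String) :
    should_inject_lora_py name tm = should_inject_lora_py_alt name tm := by
  rw [Bool.eq_iff_iff, pv_alt_true_iff]
  simp only [should_inject_lora_py]
  have hne : (PySem.Str.split? name ".").getD [] ≠ [] := by
    rw [pv_parts_eq]
    simp [pv_splitOn_ne_nil]
  have hlen : 0 < ((PySem.Str.split? name ".").getD []).length := List.length_pos_iff.mpr hne
  obtain ⟨b, hb⟩ : ∃ b, PySem.List.pyGet? ((PySem.Str.split? name ".").getD []) (-1) = some b := by
    simp only [PySem.List.pyGet?, PySem.List.pyIdx?]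
    rw [if_neg (by omega), if_pos (by omega)]
    exact ⟨_, by simp; exact List.getElem?_eq_getElem (by omega)⟩
  have hbmem : b ∈ (PySem.Str.split? name ".").getD [] := pv_pyGet?_mem hb
  obtain ⟨bc, hbc, hbeq⟩ : ∃ bc ∈ PySem.Chars.splitOn name.toList ['.'], b.toList = bc := by
    rw [pv_parts_eq] at hbmem
    simp at hbmem
    obtain ⟨bc, h1, h2⟩ := hbmem
    exact ⟨bc, h1, by simp [← h2]⟩
  rw [hb]
  simp only [Option.getD_some]
  split_ifs with h1 h2
  · constructor
    · intro _
      exact ⟨bc, hbc, b, List.contains_iff_mem.mp h1, hbeq ▸ List.infix_refl _⟩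
    · intro _; rfl
  · constructor
    · intro _
      simp only [List.any_eq_true] at h2
      obtain ⟨t, ht, hin⟩ := h2
      exact ⟨bc, hbc, t, ht, hbeq ▸ (PySem.Str.isIn_iff_infix t b).mp hin⟩
    · intro _; rfl
  · simp only [List.any_eq_true, Bool.and_eq_true, Bool.or_eq_true, beq_iff_eq]
    constructor
    · rintro ⟨t, ht, hname, part, hpartmem, hor⟩
      obtain ⟨pc, hpc, hpeq⟩ : ∃ pc ∈ PySem.Chars.splitOn name.toList ['.'], part.toList = pc := by
        rw [pv_parts_eq] at hpartmem
        simp at hpartmem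
        obtain ⟨pc, hh1, hh2⟩ := hpartmem
        exact ⟨pc, hh1, by simp [← hh2]⟩
      refine ⟨pc, hpc, t, ht, ?_⟩
      rcases hor with h | h
      · exact h ▸ hpeq ▸ List.infix_refl _
      · exact hpeq ▸ (PySem.Str.isIn_iff_infix t part).mp h
    · rintro ⟨pc, hpc, t, ht, hinf⟩
      refine ⟨t, ht, ?_, String.ofList pc, ?_, Or.inr ?_⟩
      · rw [PySem.Str.isIn_iff_infix]
        exact hinf.trans (pv_splitOn_mem_infix hpc)
      · rw [pv_parts_eq]
        exact List.mem_map_of_mem hpc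
      · rw [PySem.Str.isIn_iff_infix]
        simpa using hinf

-- ===== VERDICT (by name: the statement is the Claim_ definition above) =====
theorem should_inject_lora_py_spec : Claim_equal_should_inject_lora_py := by
  intro name tm _
  unfold Spec_should_inject_lora_py
  exact pv_main name tm
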